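-- pv_equiv track=rewrite | github.com/RAHUL8489XX/Q3.-Jump-Game-IX | Solution.py | maxValue
-- ===== SOURCE A (Python) =====
-- def maxValue(a):
--     n=len(a)
--     if n==0: return []
--     if n==1: return [a[0]]
--     p=[0]*n
--     p[0]=a[0]
--     for i in range(1,n):
--         t=p[i-1]
--         p[i]=t if t>=a[i] else a[i]
--     s=[0]*n
--     s[-1]=a[-1]
--     for i in range(n-2,-1,-1):
--         t=s[i+1]
--         s[i]=t if t<=a[i] else a[i]
--     r=[0]*n
--     st=0
--     for i in range(n-1):
--         if p[i]<=s[i+1]: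
--             m=p[i]
--             for j in range(st,i+1):
--                 r[j]=m
--             st=i+1
--     m=p[-1]
--     for j in range(st,n):
--         r[j]=m
--     return r
-- ===== SOURCE B (Python) =====
-- def maxValue(a):
--     # One left-to-right pass with a monotonic stack of (chunk_max, chunk_size);
--     # merging chunks whose max exceeds the new element replaces A's
--     # prefix-max / suffix-min arrays and fill loops.
--     st = []  # bottom..top; chunk maxes non-decreasing
--     for x in a:
--         m, c = x, 1
--         while st and st[-1][0] > x:
--             pm, pc = st.pop()
--             if pm > m:
--                 m = pm
--             c += pc
--         st.append((m, c))
--     out = []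
--     for m, c in st:
--         out.extend([m] * c)
--     return out
-- ===== Notes on version B (the rewrite author's own statement) =====
-- stated objective: alternative
-- what changed: Replaces A's prefix-max/suffix-min auxiliary arrays with their split scan and per-chunk fill loops by a single left-to-right pass over a monotonic stack of (chunk max, chunk size) pairs that merges chunks whose max exceeds the incoming element, then renders the stack.
import Mathlib
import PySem

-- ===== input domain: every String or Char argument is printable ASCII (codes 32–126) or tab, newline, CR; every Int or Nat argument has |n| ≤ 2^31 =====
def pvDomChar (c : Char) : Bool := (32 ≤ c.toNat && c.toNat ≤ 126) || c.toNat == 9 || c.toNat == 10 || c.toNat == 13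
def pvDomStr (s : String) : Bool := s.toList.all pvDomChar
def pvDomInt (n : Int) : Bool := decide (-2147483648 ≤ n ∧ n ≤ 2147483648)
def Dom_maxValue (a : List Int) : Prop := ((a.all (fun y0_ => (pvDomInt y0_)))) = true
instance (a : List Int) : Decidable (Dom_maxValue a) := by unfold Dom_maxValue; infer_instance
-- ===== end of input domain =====

-- B replaces A's prefix-max/suffix-min arrays and chunk-fill loops by one monotonic-stack
-- pass over (chunk max, chunk size) pairs (alternative algorithm, same O(n)).


-- ===== PORT A =====
def maxValue (a : List Int) : List Int :=
  let n : Int := PySem.List.len a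
  if n == 0 then []
  else if n == 1 then [PySem.List.pyGetD a 0 0]
  else
    let p := PySem.List.pySetD (List.replicate n.toNat (0:Int)) 0 (PySem.List.pyGetD a 0 0)
    let p := (PySem.List.pyRange 1 n 1).foldl (fun p i =>
        let t := PySem.List.pyGetD p (i-1) 0
        PySem.List.pySetD p i (if t ≥ PySem.List.pyGetD a i 0 then t else PySem.List.pyGetD a i 0)) p
    let s := PySem.List.pySetD (List.replicate n.toNat (0:Int)) (-1) (PySem.List.pyGetD a (-1) 0)
    let s := (PySem.List.pyRange (n-2) (-1) (-1)).foldl (fun s i =>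
        let t := PySem.List.pyGetD s (i+1) 0
        PySem.List.pySetD s i (if t ≤ PySem.List.pyGetD a i 0 then t else PySem.List.pyGetD a i 0)) s
    let rst := (PySem.List.pyRange 0 (n-1) 1).foldl (fun (rst : List Int × Int) i =>
        if PySem.List.pyGetD p i 0 ≤ PySem.List.pyGetD s (i+1) 0 then
          let m := PySem.List.pyGetD p i 0
          let r' := (PySem.List.pyRange rst.2 (i+1) 1).foldl (fun r j => PySem.List.pySetD r j m) rst.1
          (r', i+1)
        else rst) (List.replicate n.toNat (0:Int), 0)
    let m := PySem.List.pyGetD p (-1) 0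
    (PySem.List.pyRange rst.2 n 1).foldl (fun r j => PySem.List.pySetD r j m) rst.1

-- ===== PORT B =====
-- Python keeps the stack in a list with the top at the end; the port keeps the top at the
-- head (same chunks, same order of operations), and the Python while-pop is this recursion.
def popB : List (Int × Int) → Int → Int → Int → List (Int × Int)
  | [], _, m, c => [(m, c)]
  | (pm, pc) :: rest, x, m, c =>
      if pm > x then popB rest x (if pm > m then pm else m) (c + pc)
      else (m, c) :: (pm, pc) :: rest

def maxValue_alt (a : List Int) : List Int :=
  let st := a.foldl (fun st x => popB st x x 1) []
  st.reverse.foldl (fun out mc => out ++ List.replicate mc.2.toNat mc.1) []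

-- ===== PRECONDITION & SPEC =====
def Spec_maxValue (a : List Int) (out : List Int) : Prop := out = maxValue_alt a
instance (a : List Int) (out : List Int) : Decidable (Spec_maxValue a out) := by unfold Spec_maxValue; infer_instance

-- ===== CLAIM (what is proved, stated in full; the proofs are below) =====
def Claim_equal_maxValue : Prop := ∀ (a : List Int), Dom_maxValue a → Spec_maxValue a (maxValue a)

-- ===== LEMMAS AND PROOFS =====

-- max of a nonempty list (0 on [], never used there)
def pmx : List Int → Int
  | [] => 0
  | x :: xs => xs.foldl max x

-- min of a nonempty list (0 on [], never used there)
def smn : List Int → Int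
  | [] => 0
  | x :: xs => xs.foldl min x

-- i (i < n-1) is a split point of A: prefix max up to i ≤ suffix min after i
def isBdry (a : List Int) (i : Nat) : Bool := decide (pmx (a.take (i+1)) ≤ smn (a.drop (i+1)))

-- all split points, then the forced last one n-1 (a ≠ [])
def bdryList (a : List Int) : List Nat := (List.range (a.length - 1)).filter (isBdry a) ++ [a.length - 1]

-- chunks for a list of split points, threading the previous split point p
def chunksOf (a : List Int) (p : Int) : List Nat → List (Int × Int)
  | [] => []
  | b :: bs => (pmx (a.take (b+1)), (b : Int) - p) :: chunksOf a (b : Int) bs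

def bchunks (a : List Int) : List (Int × Int) := chunksOf a (-1) (bdryList a)

def renderC (L : List (Int × Int)) : List Int := L.flatMap (fun mc => List.replicate mc.2.toNat mc.1)

def lastP (bs : List Nat) (p : Int) : Int := match bs.getLast? with | none => p | some b => (b : Int)

-- ---- small list facts ----
lemma set_len_append (L : List Int) (y : Int) (t : List Int) (v : Int) :
    (L ++ y :: t).set L.length v = L ++ v :: t := by
  induction L with
  | nil => rfl
  | cons z L ih => simp [ih]

lemma set_at_of_len (L : List Int) (y : Int) (t : List Int) (v : Int) (k : Nat) (h : k = L.length) :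
    (L ++ y :: t).set k v = L ++ v :: t := by
  subst h; exact set_len_append L y t v

lemma pySetD_neg_one (xs : List Int) (h0 : 0 < xs.length) (v : Int) :
    PySem.List.pySetD xs (-1) v = xs.set (xs.length - 1) v := by
  have h1 : 1 ≤ xs.length := h0
  simp [PySem.List.pySetD, PySem.List.pySet?, PySem.List.pyIdx?, h1]

lemma pmx_append (u v : List Int) (hu : u ≠ []) : pmx (u ++ v) = v.foldl max (pmx u) := by
  cases u with
  | nil => exact absurd rfl hu
  | cons x xs => simp [pmx, List.foldl_append]

lemma pmx_snoc (u : List Int) (hu : u ≠ []) (y : Int) : pmx (u ++ [y]) = max (pmx u) y := by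
  rw [pmx_append u [y] hu]; simp

lemma le_pmx_append (u v : List Int) (hu : u ≠ []) : pmx u ≤ pmx (u ++ v) := by
  rw [pmx_append u v hu]
  exact (PySem.List.le_foldl_max v (pmx u)).1

lemma take_ne_nil (a : List Int) (ha : a ≠ []) (i : Nat) : a.take (i+1) ≠ [] := by
  simp [List.take_eq_nil_iff, ha]

lemma pmx_take_mono (a : List Int) (ha : a ≠ []) {i j : Nat} (h : i ≤ j) :
    pmx (a.take (i+1)) ≤ pmx (a.take (j+1)) := by
  have hs : a.take (j+1) = a.take (i+1) ++ (a.drop (i+1)).take (j - i) := by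
    rw [← List.take_add]; congr 1; omega
  rw [hs]; exact le_pmx_append _ _ (take_ne_nil a ha i)

lemma foldl_min_init (zs : List Int) : ∀ y z : Int, zs.foldl min (min y z) = min y (zs.foldl min z) := by
  induction zs with
  | nil => intro y z; rfl
  | cons w t ih =>
    intro y z
    show t.foldl min (min (min y z) w) = min y (t.foldl min (min z w))
    rw [min_assoc, ih]

lemma smn_cons (y : Int) (l : List Int) (hl : l ≠ []) : smn (y :: l) = min y (smn l) := by
  cases l with
  | nil => exact absurd rfl hl
  | cons z zs => show zs.foldl min (min y z) = min y (zs.foldl min z); exact foldl_min_init zs y z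

lemma smn_snoc (u : List Int) (hu : u ≠ []) (x : Int) : smn (u ++ [x]) = min (smn u) x := by
  cases u with
  | nil => exact absurd rfl hu
  | cons y ys => simp [smn, List.foldl_append]

-- ---- lastP / chunksOf ----
lemma lastP_cons (b : Nat) (u : List Nat) (p : Int) : lastP (b :: u) p = lastP u (b : Int) := by
  cases u with
  | nil => simp [lastP]
  | cons c cs =>
    show lastP (b :: c :: cs) p = lastP (c :: cs) (b : Int)
    unfold lastP
    rw [List.getLast?_cons_cons]
    cases hg : (c :: cs).getLast? with
    | none => simp at hg
    | some d => rfl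

lemma lastP_snoc (u : List Nat) (b : Nat) (p : Int) : lastP (u ++ [b]) p = (b : Int) := by
  simp [lastP]

lemma chunksOf_append (a : List Int) : ∀ (u v : List Nat) (p : Int),
    chunksOf a p (u ++ v) = chunksOf a p u ++ chunksOf a (lastP u p) v := by
  intro u
  induction u with
  | nil => intro v p; simp [chunksOf, lastP]
  | cons b u ih => intro v p; simp [chunksOf, ih, lastP_cons]

lemma chunksOf_sum (a : List Int) : ∀ (bs : List Nat) (p : Int),
    ((chunksOf a p bs).map (·.2)).sum = lastP bs p - p := by
  intro bs
  induction bs with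
  | nil => intro p; simp [chunksOf, lastP]
  | cons b bs ih =>
    intro p
    show ((b:Int) - p) + ((chunksOf a (b:Int) bs).map (·.2)).sum = lastP (b :: bs) p - p
    rw [ih, lastP_cons]
    ring

lemma mem_chunksOf (a : List Int) : ∀ (bs : List Nat) (p : Int) (q : Int × Int),
    q ∈ chunksOf a p bs → ∃ b ∈ bs, q.1 = pmx (a.take (b+1)) := by
  intro bs
  induction bs with
  | nil => intro p q h; simp [chunksOf] at h
  | cons b bs ih =>
    intro p q h
    simp only [chunksOf, List.mem_cons] at h
    rcases h with h | h
    · exact ⟨b, by simp, by rw [h]⟩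
    · obtain ⟨b', hb', he⟩ := ih _ _ h
      exact ⟨b', by simp [hb'], he⟩

lemma chunksOf_getLast (a : List Int) : ∀ (bs : List Nat) (p : Int) (b : Nat),
    bs.getLast? = some b → ∃ c, (chunksOf a p bs).getLast? = some (pmx (a.take (b+1)), c) := by
  intro bs
  induction bs with
  | nil => intro p b h; simp at h
  | cons b' bs ih =>
    intro p b h
    cases bs with
    | nil =>
      have hb : b' = b := by simpa using h
      subst hb
      exact ⟨(b':Int) - p, rfl⟩
    | cons b'' bs' =>
      rw [List.getLast?_cons_cons] at h
      obtain ⟨c, hc⟩ := ih (b' : Int) b h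
      refine ⟨c, ?_⟩
      show ((pmx (a.take (b'+1)), (b':Int) - p) :: chunksOf a (b':Int) (b''::bs')).getLast? = _
      rw [show chunksOf a (b':Int) (b''::bs') = (pmx (a.take (b''+1)), (b'':Int) - b') :: chunksOf a (b'':Int) bs' from rfl] at hc ⊢
      rw [List.getLast?_cons_cons]
      exact hc

lemma renderC_append (u v : List (Int × Int)) : renderC (u ++ v) = renderC u ++ renderC v := by
  simp [renderC]

lemma lastP_lt (bs : List Nat) (p : Int) (k : Int) (hp : p < k) (h : ∀ b ∈ bs, (b : Int) < k) :
    lastP bs p < k := by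
  cases hbs : bs.getLast? with
  | none => simpa [lastP, hbs] using hp
  | some b =>
    have : b ∈ bs := List.mem_of_getLast? hbs
    simpa [lastP, hbs] using h b this

lemma lastP_nonneg (bs : List Nat) : -1 ≤ lastP bs (-1) := by
  cases hbs : bs.getLast? with
  | none => simp [lastP, hbs]
  | some b => simp only [lastP, hbs]; omega

lemma renderC_len (a : List Int) : ∀ (bs : List Nat) (p : Int),
    bs.Pairwise (· < ·) → (∀ b ∈ bs, p < (b : Int)) →
    ((renderC (chunksOf a p bs)).length : Int) = lastP bs p - p := by
  intro bs
  induction bs with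
  | nil => intro p _ _; simp [chunksOf, renderC, lastP]
  | cons b bs ih =>
    intro p hpw hgt
    have hb : p < (b : Int) := hgt b (by simp)
    have hpw' := (List.pairwise_cons.1 hpw)
    have hlen := ih (b : Int) hpw'.2 (fun b' hb' => by exact_mod_cast hpw'.1 b' hb')
    have hlast : (b : Int) ≤ lastP bs (b : Int) := by
      cases hbs : bs.getLast? with
      | none => simp [lastP, hbs]
      | some b' =>
        have : b' ∈ bs := List.mem_of_getLast? hbs
        have := hpw'.1 b' this
        simp only [lastP, hbs]
        omega
    show (((renderC ((pmx (a.take (b+1)), (b:Int) - p) :: chunksOf a (b:Int) bs)).length : Int)) = _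
    rw [show renderC ((pmx (a.take (b+1)), (b:Int) - p) :: chunksOf a (b:Int) bs)
        = List.replicate ((b:Int) - p).toNat (pmx (a.take (b+1))) ++ renderC (chunksOf a (b:Int) bs) from rfl]
    rw [List.length_append, List.length_replicate]
    push_cast
    rw [hlen, lastP_cons]
    omega

-- ---- bdryList facts ----
lemma bdryList_pairwise (a : List Int) : (bdryList a).Pairwise (· < ·) := by
  unfold bdryList
  refine List.pairwise_append.2 ⟨List.Pairwise.sublist List.filter_sublist List.pairwise_lt_range, by simp, ?_⟩
  intro b hb b' hb'
  simp at hb'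
  subst hb'
  have := List.mem_range.1 (List.mem_of_mem_filter hb)
  omega

lemma mem_bdryList_le (a : List Int) {b : Nat} (hb : b ∈ bdryList a) : b ≤ a.length - 1 := by
  unfold bdryList at hb
  rcases List.mem_append.1 hb with h | h
  · have := List.mem_range.1 (List.mem_of_mem_filter h); omega
  · simp at h; omega

lemma bdryList_sublist_range (a : List Int) (ha : a ≠ []) : List.Sublist (bdryList a) (List.range a.length) := by
  have h1 : a.length = (a.length - 1) + 1 := by
    cases a with | nil => exact absurd rfl ha | cons x xs => simp
  rw [h1, List.range_succ]
  exact List.Sublist.append List.filter_sublist (List.Sublist.refl _)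

lemma bdryList_getLast (a : List Int) : (bdryList a).getLast? = some (a.length - 1) := by
  simp [bdryList]

-- ---- the fill loop ----
lemma fill_loop (m : Int) : ∀ (c : Nat) (pre t : List Int), c ≤ t.length →
    (PySem.List.pyRange (pre.length : Int) ((pre.length : Int) + (c : Int)) 1).foldl
      (fun r j => PySem.List.pySetD r j m) (pre ++ t)
    = pre ++ List.replicate c m ++ t.drop c := by
  intro c
  induction c with
  | zero => intro pre t _; simp [PySem.List.pyRange_one_eq_nil]
  | succ c ih =>
    intro pre t hc
    cases t with
    | nil => simp at hc
    | cons y t' =>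
      have hcons : PySem.List.pyRange (pre.length : Int) ((pre.length : Int) + ((c:Int)+1)) 1
          = (pre.length : Int) :: PySem.List.pyRange ((pre.length : Int) + 1) ((pre.length : Int) + ((c:Int)+1)) 1 :=
        PySem.List.pyRange_one_cons (by omega)
      push_cast
      rw [hcons, List.foldl_cons]
      have hset : PySem.List.pySetD (pre ++ y :: t') (pre.length : Int) m = pre ++ m :: t' := by
        rw [PySem.List.pySetD_natCast, set_len_append]
      rw [hset]
      have hsplit : pre ++ m :: t' = (pre ++ [m]) ++ t' := by simp
      rw [hsplit]
      have hlen : ((pre ++ [m]).length : Int) = (pre.length : Int) + 1 := by simp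
      have hih := ih (pre ++ [m]) t' (by simp only [List.length_cons] at hc; omega)
      rw [hlen] at hih
      rw [show (pre.length : Int) + ((c:Int)+1) = (pre.length : Int) + 1 + (c:Int) from by ring, hih]
      simp [List.replicate_succ]

-- ---- the p loop ----
lemma ploop (a : List Int) (h1 : 1 ≤ a.length) : ∀ (k : Nat), 1 ≤ k → k ≤ a.length →
    (PySem.List.pyRange 1 (k : Int) 1).foldl (fun p i =>
        PySem.List.pySetD p i (if PySem.List.pyGetD p (i-1) 0 ≥ PySem.List.pyGetD a i 0
          then PySem.List.pyGetD p (i-1) 0 else PySem.List.pyGetD a i 0))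
      (PySem.List.pySetD (List.replicate a.length (0:Int)) 0 (PySem.List.pyGetD a 0 0))
    = (List.range k).map (fun i => pmx (a.take (i+1))) ++ List.replicate (a.length - k) 0 := by
  intro k
  induction k with
  | zero => intro h _; omega
  | succ k ih =>
    intro _ hk1
    by_cases hk : k = 0
    · subst hk
      rw [show ((1:Nat) : Int) = 1 from rfl, PySem.List.pyRange_one_eq_nil (by omega), List.foldl_nil]
      cases a with
      | nil => simp at h1
      | cons x xs =>
        rw [PySem.List.pyGetD_zero_cons]
        rw [show (x :: xs).length = xs.length + 1 from rfl, List.replicate_succ]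
        rw [show (0:Int) = ((0:Nat):Int) from rfl, PySem.List.pySetD_natCast]
        simp [pmx]
    · have hk1' : 1 ≤ k := by omega
      have hsplit : PySem.List.pyRange 1 ((k+1 : Nat) : Int) 1 = PySem.List.pyRange 1 (k : Int) 1 ++ [(k : Int)] := by
        push_cast
        exact PySem.List.pyRange_one_succ_right (by exact_mod_cast hk1')
      rw [hsplit, List.foldl_append, ih hk1' (by omega), List.foldl_cons, List.foldl_nil]
      have hkl : k < a.length := by omega
      have hane : a ≠ [] := by intro h; rw [h] at hkl; simp at hkl
      have hr : PySem.List.pyGetD ((List.range k).map (fun i => pmx (a.take (i+1))) ++ List.replicate (a.length - k) 0) ((k:Int)-1) 0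
          = pmx (a.take k) := by
        rw [show (k:Int) - 1 = ((k-1 : Nat) : Int) from by push_cast [hk1']; omega, PySem.List.pyGetD_natCast]
        rw [List.getD_eq_getElem?_getD, List.getElem?_append_left (by simp; omega)]
        simp [List.getElem?_range (show k-1 < k from by omega)]
        rw [show k - 1 + 1 = k from by omega]
      have hra : PySem.List.pyGetD a (k : Int) 0 = a[k] := by
        rw [PySem.List.pyGetD_natCast]; exact List.getD_eq_getElem a 0 hkl
      rw [hr, hra]
      have hval : (if pmx (a.take k) ≥ a[k] then pmx (a.take k) else a[k]) = pmx (a.take (k+1)) := by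
        have hts : a.take (k+1) = a.take k ++ [a[k]] := by
          rw [List.take_add_one]; simp [List.getElem?_eq_getElem hkl]
        rw [hts, pmx_snoc _ (by simp [List.take_eq_nil_iff, hane]; omega) a[k]]
        rcases le_total (pmx (a.take k)) a[k] with h | h
        · rw [max_eq_right h]
          by_cases he : a[k] ≤ pmx (a.take k)
          · simp [ge_iff_le, he]; omega
          · simp [ge_iff_le, he]
        · rw [max_eq_left h]; simp [ge_iff_le, h]
      rw [hval]
      have hrep : List.replicate (a.length - k) (0:Int) = (0:Int) :: List.replicate (a.length - (k+1)) 0 := by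
        rw [show a.length - k = (a.length - (k+1)) + 1 from by omega, List.replicate_succ]
      rw [PySem.List.pySetD_natCast, hrep]
      rw [set_at_of_len _ _ _ _ k (by simp)]
      rw [List.range_succ]
      simp

-- ---- the s loop ----
lemma sloop (a : List Int) (h2 : 2 ≤ a.length) : ∀ (m : Nat), m ≤ a.length - 1 →
    (PySem.List.pyRange ((m : Int) - 1) (-1) (-1)).foldl (fun s i =>
        PySem.List.pySetD s i (if PySem.List.pyGetD s (i+1) 0 ≤ PySem.List.pyGetD a i 0
          then PySem.List.pyGetD s (i+1) 0 else PySem.List.pyGetD a i 0))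
      (List.replicate m 0 ++ (List.range (a.length - m)).map (fun t => smn (a.drop (m+t))))
    = (List.range a.length).map (fun t => smn (a.drop t)) := by
  intro m
  induction m with
  | zero => intro _; rw [PySem.List.pyRange_neg_one_eq_nil (by omega)]; simp
  | succ m ih =>
    intro hm
    have hcons : PySem.List.pyRange (((m+1 : Nat) : Int) - 1) (-1) (-1)
        = (m : Int) :: PySem.List.pyRange ((m : Int) - 1) (-1) (-1) := by
      push_cast
      rw [show (m:Int) + 1 - 1 = (m:Int) from by ring]
      exact PySem.List.pyRange_neg_one_cons (by omega)
    rw [hcons, List.foldl_cons]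
    have hmlt : m + 1 < a.length := by omega
    have hr : PySem.List.pyGetD (List.replicate (m+1) (0:Int) ++ (List.range (a.length - (m+1))).map (fun t => smn (a.drop (m+1+t)))) ((m:Int)+1) 0
        = smn (a.drop (m+1)) := by
      rw [show (m:Int) + 1 = ((m+1 : Nat) : Int) from by push_cast; ring, PySem.List.pyGetD_natCast]
      rw [List.getD_eq_getElem?_getD, List.getElem?_append_right (by simp)]
      simp [List.getElem?_range (show 0 < a.length - (m+1) from by omega)]
    have hra : PySem.List.pyGetD a (m : Int) 0 = a[m] := by
      rw [PySem.List.pyGetD_natCast]; exact List.getD_eq_getElem a 0 (by omega)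
    rw [hr, hra]
    have hval : (if smn (a.drop (m+1)) ≤ a[m] then smn (a.drop (m+1)) else a[m]) = smn (a.drop m) := by
      have hdc : a.drop m = a[m] :: a.drop (m+1) := List.drop_eq_getElem_cons (by omega)
      rw [hdc, smn_cons _ _ (by simp; omega)]
      by_cases hc : smn (a.drop (m+1)) ≤ a[m]
      · rw [if_pos hc, min_eq_right hc]
      · rw [if_neg hc, min_eq_left (by omega)]
    rw [hval]
    have hrep : List.replicate (m+1) (0:Int) = List.replicate m 0 ++ [0] := List.replicate_succ' ..
    rw [PySem.List.pySetD_natCast, hrep, List.append_assoc, List.singleton_append]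
    rw [set_at_of_len _ _ _ _ m (by simp)]
    have htail : smn (a.drop m) :: (List.range (a.length - (m+1))).map (fun t => smn (a.drop (m+1+t)))
        = (List.range (a.length - m)).map (fun t => smn (a.drop (m+t))) := by
      rw [show a.length - m = (a.length - (m+1)) + 1 from by omega, List.range_succ_eq_map]
      simp only [List.map_cons, List.map_map]
      refine congrArg₂ List.cons rfl ?_
      refine List.map_congr_left ?_
      intro t _
      rw [show m+1+t = m+(t+1) from by omega]
      rfl
    rw [htail]
    exact ih (by omega)

-- ---- the r loop ----
lemma filter_range_succ (a : List Int) (k : Nat) :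
    (List.range (k+1)).filter (isBdry a) = (List.range k).filter (isBdry a)
      ++ (if isBdry a k then [k] else []) := by
  rw [List.range_succ, List.filter_append]
  congr 1
  by_cases hb : isBdry a k <;> simp [hb]

lemma mem_filter_range_lt (a : List Int) {k b : Nat} (h : b ∈ (List.range k).filter (isBdry a)) : b < k :=
  List.mem_range.1 (List.mem_of_mem_filter h)

lemma pvec_getD (a : List Int) {k : Nat} (hk : k < a.length) :
    PySem.List.pyGetD ((List.range a.length).map (fun i => pmx (a.take (i+1)))) (k : Int) 0
      = pmx (a.take (k+1)) := by
  rw [PySem.List.pyGetD_natCast, List.getD_eq_getElem?_getD]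
  simp [List.getElem?_range hk]

lemma svec_getD (a : List Int) {k : Nat} (hk : k < a.length) :
    PySem.List.pyGetD ((List.range a.length).map (fun t => smn (a.drop t))) (k : Int) 0
      = smn (a.drop k) := by
  rw [PySem.List.pyGetD_natCast, List.getD_eq_getElem?_getD]
  simp [List.getElem?_range hk]

lemma rloop (a : List Int) (h2 : 2 ≤ a.length) : ∀ (k : Nat), k ≤ a.length - 1 →
    (PySem.List.pyRange 0 (k : Int) 1).foldl (fun (rst : List Int × Int) i =>
        if PySem.List.pyGetD ((List.range a.length).map (fun i => pmx (a.take (i+1)))) i 0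
            ≤ PySem.List.pyGetD ((List.range a.length).map (fun t => smn (a.drop t))) (i+1) 0 then
          ((PySem.List.pyRange rst.2 (i+1) 1).foldl (fun r j =>
              PySem.List.pySetD r j (PySem.List.pyGetD ((List.range a.length).map (fun i => pmx (a.take (i+1)))) i 0)) rst.1,
           i+1)
        else rst) (List.replicate a.length (0:Int), 0)
    = (renderC (chunksOf a (-1) ((List.range k).filter (isBdry a)))
        ++ List.replicate (a.length - (lastP ((List.range k).filter (isBdry a)) (-1) + 1).toNat) 0,
       lastP ((List.range k).filter (isBdry a)) (-1) + 1) := by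
  intro k
  induction k with
  | zero =>
    intro _
    rw [show ((0:Nat) : Int) = 0 from rfl, PySem.List.pyRange_one_eq_nil (by omega), List.foldl_nil]
    simp [chunksOf, renderC, lastP]
  | succ k ih =>
    intro hk
    have hkn : k < a.length - 1 := by omega
    have hsplit : PySem.List.pyRange 0 ((k+1 : Nat) : Int) 1 = PySem.List.pyRange 0 (k : Int) 1 ++ [(k : Int)] := by
      push_cast
      exact PySem.List.pyRange_one_succ_right (by omega)
    rw [hsplit, List.foldl_append, ih (by omega), List.foldl_cons, List.foldl_nil]
    set bs := (List.range k).filter (isBdry a) with hbs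
    have hblt : ∀ b ∈ bs, b < k := fun b hb => mem_filter_range_lt a hb
    have hbpw : bs.Pairwise (· < ·) := List.Pairwise.sublist List.filter_sublist List.pairwise_lt_range
    have hane : a ≠ [] := by intro h; rw [h] at h2; simp at h2
    have hlastlt : lastP bs (-1) < (k : Int) := lastP_lt bs (-1) k (by omega) (fun b hb => by exact_mod_cast hblt b hb)
    have hlast0 : -1 ≤ lastP bs (-1) := lastP_nonneg bs
    set st := (lastP bs (-1) + 1).toNat with hst
    have hstc : ((st : Nat) : Int) = lastP bs (-1) + 1 := by omega
    have hstk : st ≤ k := by omega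
    have hpre : ((renderC (chunksOf a (-1) bs)).length : Int) = lastP bs (-1) + 1 := by
      rw [renderC_len a bs (-1) hbpw (fun b hb => by omega)]; ring
    have hprelen : (renderC (chunksOf a (-1) bs)).length = st := by omega
    rw [pvec_getD a (show k < a.length from by omega)]
    rw [show ((k:Int) + 1) = ((k+1 : Nat) : Int) from by push_cast; ring]
    rw [svec_getD a (show k + 1 < a.length from by omega)]
    by_cases hb : isBdry a k
    · have hcond : pmx (a.take (k+1)) ≤ smn (a.drop (k+1)) := by
        simpa [isBdry] using hb
      rw [if_pos hcond]
      have hfill := fill_loop (pmx (a.take (k+1))) (k + 1 - st) (renderC (chunksOf a (-1) bs))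
        (List.replicate (a.length - st) 0) (by simp; omega)
      rw [hprelen, hstc] at hfill
      rw [show lastP bs (-1) + 1 + ((k + 1 - st : Nat) : Int) = ((k+1 : Nat) : Int) from by push_cast; omega] at hfill
      simp only [hfill, List.drop_replicate]
      rw [filter_range_succ, hb, if_pos rfl, chunksOf_append, renderC_append, lastP_snoc]
      have hchunk : renderC (chunksOf a (lastP bs (-1)) [k])
          = List.replicate (k + 1 - st) (pmx (a.take (k+1))) := by
        show List.replicate ((k : Int) - lastP bs (-1)).toNat (pmx (a.take (k+1))) ++ [] = _
        rw [List.append_nil]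
        congr 1
        omega
      rw [hchunk, Prod.mk.injEq]
      refine ⟨?_, ?_⟩
      · congr 1
        congr 1
        omega
      · push_cast; ring
    · have hcond : ¬ (pmx (a.take (k+1)) ≤ smn (a.drop (k+1))) := by
        simpa [isBdry] using hb
      rw [if_neg hcond]
      rw [filter_range_succ, if_neg (by simpa using hb), List.append_nil]

lemma pvec_last (a : List Int) (h1 : 1 ≤ a.length) :
    PySem.List.pyGetD ((List.range a.length).map (fun i => pmx (a.take (i+1)))) (-1) 0 = pmx a := by
  have hne : (List.range a.length).map (fun i => pmx (a.take (i+1))) ≠ [] := by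
    rw [Ne, List.map_eq_nil_iff, List.range_eq_nil]
    omega
  rw [PySem.List.pyGetD_neg_one _ 0 hne]
  rw [List.getLast_eq_getElem]
  simp only [List.length_map, List.length_range]
  rw [List.getElem_map, List.getElem_range]
  rw [show a.length - 1 + 1 = a.length from by omega, List.take_length]

-- A's program equals the rendered chunk list
lemma maxValue_eq_renderC (a : List Int) (h2 : 2 ≤ a.length) :
    maxValue a = renderC (bchunks a) := by
  have hane : a ≠ [] := by intro h; rw [h] at h2; simp at h2
  have h1 : 1 ≤ a.length := by omega
  have e0 : (((a.length : Int)) == 0) = false := by simp; omega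
  have e1 : (((a.length : Int)) == 1) = false := by simp; omega
  simp only [maxValue, PySem.List.len_eq, e0, e1, Bool.false_eq_true, if_false, Int.toNat_natCast]
  rw [ploop a h1 a.length h1 (le_refl _)]
  rw [Nat.sub_self, List.replicate_zero, List.append_nil]
  have hs0 : PySem.List.pySetD (List.replicate a.length (0:Int)) (-1) (PySem.List.pyGetD a (-1) 0)
      = List.replicate (a.length - 1) 0
        ++ (List.range (a.length - (a.length - 1))).map (fun t => smn (a.drop ((a.length - 1) + t))) := by
    rw [PySem.List.pyGetD_neg_one _ 0 hane]
    rw [pySetD_neg_one _ (by simp; omega)]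
    rw [List.length_replicate]
    rw [show List.replicate a.length (0:Int) = List.replicate (a.length - 1) 0 ++ [0] from by
      rw [← List.replicate_succ']; congr 1; omega]
    rw [set_at_of_len _ _ _ _ _ (by simp)]
    rw [show a.length - (a.length - 1) = 1 from by omega, List.range_one, List.map_cons, List.map_nil]
    rw [Nat.add_zero]
    have hd : a.drop (a.length - 1) = [a.getLast hane] := by
      rw [List.drop_eq_getElem_cons (by omega)]
      rw [show a.length - 1 + 1 = a.length from by omega, List.drop_length]
      rw [List.getLast_eq_getElem]
    rw [hd]
    rfl
  rw [hs0]
  rw [show (a.length : Int) - 2 = (((a.length - 1 : Nat)) : Int) - 1 from by omega]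
  rw [sloop a h2 (a.length - 1) (le_refl _)]
  rw [show (a.length : Int) - 1 = (((a.length - 1 : Nat)) : Int) from by omega]
  rw [rloop a h2 (a.length - 1) (le_refl _)]
  simp only [pvec_last a h1]
  set bs := (List.range (a.length - 1)).filter (isBdry a) with hbs
  have hblt : ∀ b ∈ bs, b < a.length - 1 := fun b hb => mem_filter_range_lt a hb
  have hbpw : bs.Pairwise (· < ·) := List.Pairwise.sublist List.filter_sublist List.pairwise_lt_range
  have hlastlt : lastP bs (-1) < ((a.length - 1 : Nat) : Int) :=
    lastP_lt bs (-1) _ (by omega) (fun b hb => by exact_mod_cast hblt b hb)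
  have hlast0 : -1 ≤ lastP bs (-1) := lastP_nonneg bs
  set st := (lastP bs (-1) + 1).toNat with hst
  have hstc : ((st : Nat) : Int) = lastP bs (-1) + 1 := by omega
  have hpre : ((renderC (chunksOf a (-1) bs)).length : Int) = lastP bs (-1) + 1 := by
    rw [renderC_len a bs (-1) hbpw (fun b hb => by omega)]; ring
  have hprelen : (renderC (chunksOf a (-1) bs)).length = st := by omega
  have hfill := fill_loop (pmx a) (a.length - st) (renderC (chunksOf a (-1) bs))
    (List.replicate (a.length - st) 0) (by simp)
  rw [hprelen, hstc] at hfill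
  rw [show lastP bs (-1) + 1 + ((a.length - st : Nat) : Int) = (a.length : Int) from by omega] at hfill
  rw [hfill]
  rw [List.drop_replicate, Nat.sub_self, List.replicate_zero, List.append_nil]
  rw [show bchunks a = chunksOf a (-1) (bs ++ [a.length - 1]) from rfl]
  rw [chunksOf_append, renderC_append]
  rw [show chunksOf a (lastP bs (-1)) [a.length - 1]
      = [(pmx (a.take (a.length - 1 + 1)), ((a.length - 1 : Nat) : Int) - lastP bs (-1))] from rfl]
  rw [show a.length - 1 + 1 = a.length from by omega, List.take_length]
  rw [show renderC [(pmx a, ((a.length - 1 : Nat):Int) - lastP bs (-1))]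
      = List.replicate (((a.length - 1 : Nat):Int) - lastP bs (-1)).toNat (pmx a) from by simp [renderC]]
  congr 2
  omega

-- ---- B side ----
lemma popB_run : ∀ (e k : List (Int × Int)) (x m c : Int),
    (∀ q ∈ e, x < q.1) → (∀ q ∈ k.head?, q.1 ≤ x) →
    popB (e ++ k) x m c
      = (e.foldl (fun m q => if q.1 > m then q.1 else m) m, c + (e.map (·.2)).sum) :: k := by
  intro e
  induction e with
  | nil =>
    intro k x m c _ hk
    cases k with
    | nil => simp [popB]
    | cons q k' =>
      obtain ⟨pm, pc⟩ := q
      have : pm ≤ x := by simpa using hk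
      simp [popB, show ¬ (pm > x) from by omega]
  | cons q e ih =>
    intro k x m c he hk
    obtain ⟨pm, pc⟩ := q
    have hgt : x < pm := by have := he (pm, pc) (by simp); simpa using this
    show popB ((pm, pc) :: (e ++ k)) x m c = _
    rw [popB, if_pos (by omega)]
    rw [ih k x _ _ (fun q hq => he q (by simp [hq])) hk]
    simp only [List.foldl_cons, List.map_cons, List.sum_cons]
    refine congrArg₂ List.cons (Prod.ext rfl ?_) rfl
    show c + pc + (e.map (·.2)).sum = c + (pc + (e.map (·.2)).sum)
    ring

lemma foldl_max_const : ∀ (L : List (Int × Int)) (M : Int),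
    (∀ q ∈ L, q.1 ≤ M) → L.foldl (fun m q => if q.1 > m then q.1 else m) M = M := by
  intro L
  induction L with
  | nil => intro M _; rfl
  | cons q L ih =>
    intro M h
    have : ¬ (q.1 > M) := by have := h q (by simp); omega
    simp only [List.foldl_cons, this, if_false]
    exact ih M (fun q hq => h q (by simp [hq]))

-- dropWhile of an antitone predicate over a sorted list is all-false
lemma dropWhile_all_false (P : Nat → Bool)
    (hP : ∀ b b', b ≤ b' → P b' = true → P b = true) :
    ∀ (bs : List Nat), bs.Pairwise (· < ·) → ∀ b ∈ bs.dropWhile P, P b = false := by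
  intro bs
  induction bs with
  | nil => intro _ b hb; simp at hb
  | cons b0 bs ih =>
    intro hpw b hb
    have hpw' := List.pairwise_cons.1 hpw
    by_cases h0 : P b0
    · rw [List.dropWhile_cons_of_pos h0] at hb
      exact ih hpw'.2 b hb
    · rw [List.dropWhile_cons_of_neg h0] at hb
      rcases List.mem_cons.1 hb with rfl | hb'
      · simpa using h0
      · by_cases hPb : P b
        · exact absurd (hP b0 b (le_of_lt (hpw'.1 b hb')) hPb) (by simpa using h0)
        · simpa using hPb

lemma filter_eq_takeWhile (P : Nat → Bool)
    (hP : ∀ b b', b ≤ b' → P b' = true → P b = true) :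
    ∀ (bs : List Nat), bs.Pairwise (· < ·) → bs.filter P = bs.takeWhile P := by
  intro bs
  induction bs with
  | nil => intro _; rfl
  | cons b0 bs ih =>
    intro hpw
    have hpw' := List.pairwise_cons.1 hpw
    by_cases h0 : P b0
    · rw [List.filter_cons_of_pos h0, List.takeWhile_cons_of_pos h0, ih hpw'.2]
    · rw [List.filter_cons_of_neg h0, List.takeWhile_cons_of_neg h0]
      rw [List.filter_eq_nil_iff]
      intro b hb
      by_cases hPb : P b
      · exact absurd (hP b0 b (le_of_lt (hpw'.1 b hb)) hPb) h0
      · simpa using hPb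

lemma filter_of_sublist (P : Nat → Bool) :
    ∀ {L bs : List Nat}, List.Sublist bs L → L.Nodup →
    L.filter (fun i => decide (i ∈ bs) && P i) = bs.filter P := by
  intro L
  induction L with
  | nil => intro bs h _; rw [List.sublist_nil.1 h]; rfl
  | cons b L ihL =>
    intro bs h hnd
    have hnd' := List.nodup_cons.1 hnd
    rcases List.sublist_cons_iff.1 h with hsub | ⟨bs', rfl, hsub⟩
    · have hbnot : b ∉ bs := fun hmem => hnd'.1 (hsub.subset hmem)
      rw [List.filter_cons]
      simp only [hbnot, decide_false, Bool.false_and]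
      rw [if_neg (by simp)]
      exact ihL hsub hnd'.2
    · rw [List.filter_cons, List.filter_cons]
      have hmem : (decide (b ∈ b :: bs') && P b) = P b := by simp
      rw [hmem]
      have hcongr : L.filter (fun i => decide (i ∈ b :: bs') && P i)
          = L.filter (fun i => decide (i ∈ bs') && P i) := by
        apply List.filter_congr
        intro i hi
        have hne : i ≠ b := fun he => hnd'.1 (he ▸ hi)
        simp [List.mem_cons, hne]
      rw [hcongr, ihL hsub hnd'.2]

-- boundary list of a snoc
lemma bdryList_snoc (l : List Int) (hl : l ≠ []) (x : Int) :
    bdryList (l ++ [x]) = (bdryList l).filter (fun b => decide (pmx (l.take (b+1)) ≤ x)) ++ [l.length] := by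
  have h1 : 1 ≤ l.length := by
    cases l with | nil => exact absurd rfl hl | cons y ys => simp
  have hsub : List.Sublist (bdryList l) (List.range l.length) := bdryList_sublist_range l hl
  have hpt : ∀ i ∈ List.range l.length,
      isBdry (l ++ [x]) i = (decide (i ∈ bdryList l) && decide (pmx (l.take (i+1)) ≤ x)) := by
    intro i hi
    have hi' : i < l.length := List.mem_range.1 hi
    by_cases hlt : i < l.length - 1
    · have htk : (l ++ [x]).take (i+1) = l.take (i+1) := List.take_append_of_le_length (by omega)
      have hdr : (l ++ [x]).drop (i+1) = l.drop (i+1) ++ [x] := List.drop_append_of_le_length (by omega)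
      have hdnn : l.drop (i+1) ≠ [] := by simp; omega
      have hsm : smn ((l++[x]).drop (i+1)) = min (smn (l.drop (i+1))) x := by
        rw [hdr, smn_snoc _ hdnn]
      have hmem : (i ∈ bdryList l) ↔ isBdry l i = true := by
        unfold bdryList
        rw [List.mem_append]
        simp only [List.mem_filter, List.mem_range, List.mem_singleton]
        constructor
        · rintro (⟨_, h⟩ | h)
          · exact h
          · omega
        · intro h
          exact Or.inl ⟨hlt, h⟩
      have hdec : (decide (i ∈ bdryList l)) = isBdry l i := by
        by_cases hB : isBdry l i <;> simp [hmem, hB]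
      rw [hdec]
      rw [Bool.eq_iff_iff]
      unfold isBdry
      rw [htk, hsm]
      simp only [Bool.and_eq_true, decide_eq_true_eq]
      exact le_min_iff
    · have hieq : i = l.length - 1 := by omega
      subst hieq
      have htk : (l ++ [x]).take (l.length - 1 + 1) = l := by
        rw [show l.length - 1 + 1 = l.length from by omega]
        exact List.take_left ..
      have hdr : (l ++ [x]).drop (l.length - 1 + 1) = [x] := by
        rw [show l.length - 1 + 1 = l.length from by omega]
        exact List.drop_left ..
      have hmem : ((l.length - 1) ∈ bdryList l) := by unfold bdryList; simp
      unfold isBdry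
      rw [htk, hdr]
      rw [show smn [x] = x from rfl]
      simp only [hmem, decide_true, Bool.true_and]
      rw [Bool.eq_iff_iff]
      simp only [decide_eq_true_eq]
      rw [show l.length - 1 + 1 = l.length from by omega, List.take_length]
  have hlen1 : (l ++ [x]).length - 1 = l.length := by simp
  unfold bdryList
  rw [hlen1]
  congr 1
  rw [List.filter_congr hpt]
  exact filter_of_sublist _ hsub (List.nodup_range)

lemma chunksOf_take_congr (l : List Int) (x : Int) : ∀ (bs : List Nat) (p : Int),
    (∀ b ∈ bs, b + 1 ≤ l.length) → chunksOf (l ++ [x]) p bs = chunksOf l p bs := by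
  intro bs
  induction bs with
  | nil => intro p _; rfl
  | cons b bs ih =>
    intro p hmem
    show (pmx ((l ++ [x]).take (b+1)), _) :: _ = (pmx (l.take (b+1)), _) :: _
    rw [List.take_append_of_le_length (hmem b (by simp))]
    rw [ih (b : Int) (fun b' hb' => hmem b' (by simp [hb']))]

-- one snoc step of the stack fold
lemma step_main (l : List Int) (hl : l ≠ []) (x : Int) :
    popB ((bchunks l).reverse) x x 1 = (bchunks (l ++ [x])).reverse := by
  have h1n : 1 ≤ l.length := by
    cases l with | nil => exact absurd rfl hl | cons y ys => simp
  set P : Nat → Bool := fun b => decide (pmx (l.take (b+1)) ≤ x) with hPdef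
  have hPterm : ∀ b b', b ≤ b' → P b' = true → P b = true := by
    intro b b' hbb hPb'
    simp only [hPdef, decide_eq_true_eq] at hPb' ⊢
    exact le_trans (pmx_take_mono l hl hbb) hPb'
  have hsorted : (bdryList l).Pairwise (· < ·) := bdryList_pairwise l
  set K := (bdryList l).takeWhile P with hK
  set D := (bdryList l).dropWhile P with hD
  have hKD : bdryList l = K ++ D := (List.takeWhile_append_dropWhile).symm
  have hKP : ∀ b ∈ K, P b = true := fun b hb => List.mem_takeWhile_imp hb
  have hDP : ∀ b ∈ D, P b = false := dropWhile_all_false P hPterm (bdryList l) hsorted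
  have hKle : ∀ b ∈ K, b + 1 ≤ l.length := by
    intro b hb
    have hbs : b ∈ bdryList l := by rw [hKD]; exact List.mem_append.2 (Or.inl hb)
    have := mem_bdryList_le l hbs
    omega
  have hsplitc : bchunks l = chunksOf l (-1) K ++ chunksOf l (lastP K (-1)) D := by
    rw [bchunks, hKD, chunksOf_append]
  have heD : ∀ q ∈ (chunksOf l (lastP K (-1)) D).reverse, x < q.1 := by
    intro q hq
    rw [List.mem_reverse] at hq
    obtain ⟨b, hb, hqe⟩ := mem_chunksOf l D _ q hq
    have hf := hDP b hb
    rw [hqe]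
    simp only [hPdef, decide_eq_false_iff_not, not_le] at hf
    exact hf
  have hkK : ∀ q ∈ ((chunksOf l (-1) K).reverse).head?, q.1 ≤ x := by
    intro q hq
    rw [List.head?_reverse] at hq
    have hqmem : q ∈ chunksOf l (-1) K := List.mem_of_getLast? hq
    obtain ⟨b, hb, hqe⟩ := mem_chunksOf l K _ q hqmem
    have ht := hKP b hb
    rw [hqe]
    simpa [hPdef] using ht
  rw [hsplitc, List.reverse_append]
  rw [popB_run _ _ x x 1 heD hkK]
  have hbsl : (bdryList l).getLast? = some (l.length - 1) := bdryList_getLast l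
  have hnew : bdryList (l ++ [x]) = K ++ [l.length] := by
    rw [bdryList_snoc l hl x]
    rw [show (bdryList l).filter (fun b => decide (pmx (l.take (b+1)) ≤ x)) = (bdryList l).filter P from rfl]
    rw [filter_eq_takeWhile P hPterm (bdryList l) hsorted]
  rw [bchunks, hnew, chunksOf_append]
  rw [chunksOf_take_congr l x K (-1) hKle]
  rw [show chunksOf (l ++ [x]) (lastP K (-1)) [l.length]
      = [(pmx ((l++[x]).take (l.length+1)), (l.length : Int) - lastP K (-1))] from rfl]
  rw [show (l ++ [x]).take (l.length + 1) = l ++ [x] from by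
    rw [show l.length + 1 = (l ++ [x]).length from by simp]
    exact List.take_length ..]
  rw [List.reverse_append, List.reverse_singleton, List.singleton_append]
  refine congrArg₂ List.cons (Prod.ext ?_ ?_) rfl
  · -- max component
    by_cases hDnil : D = []
    · rw [hDnil]
      simp only [chunksOf, List.reverse_nil, List.foldl_nil]
      have hKbs : K = bdryList l := by rw [hKD, hDnil, List.append_nil]
      have hPl : P (l.length - 1) = true := by
        apply hKP
        rw [hKbs]
        exact List.mem_of_getLast? hbsl
      have hle : pmx l ≤ x := by
        have := hPl
        simp only [hPdef, decide_eq_true_eq] at this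
        rwa [show l.length - 1 + 1 = l.length from by omega, List.take_length] at this
      rw [pmx_snoc l hl x, max_eq_right hle]
    · have hDlast : D.getLast? = some (l.length - 1) := by
        rw [hKD] at hbsl
        rwa [List.getLast?_append_of_ne_nil _ hDnil] at hbsl
      obtain ⟨c0, hc0⟩ := chunksOf_getLast l D (lastP K (-1)) (l.length - 1) hDlast
      have hEhead : ((chunksOf l (lastP K (-1)) D).reverse).head? = some (pmx (l.take (l.length - 1 + 1)), c0) := by
        rw [List.head?_reverse]; exact hc0
      cases hEeq : (chunksOf l (lastP K (-1)) D).reverse with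
      | nil => rw [hEeq] at hEhead; simp at hEhead
      | cons q0 E' =>
        rw [hEeq] at hEhead
        have hq0 : q0 = (pmx l, c0) := by
          have := hEhead
          simp only [List.head?_cons, Option.some.injEq] at this
          rw [this, show l.length - 1 + 1 = l.length from by omega, List.take_length]
        rw [List.foldl_cons, hq0]
        have hplx : x < pmx l := by
          have hf := hDP (l.length - 1) (List.mem_of_getLast? hDlast)
          simp only [hPdef, decide_eq_false_iff_not, not_le] at hf
          rwa [show l.length - 1 + 1 = l.length from by omega, List.take_length] at hf
        rw [if_pos (by simpa using hplx)]
        have hrest : ∀ q ∈ E', q.1 ≤ pmx l := by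
          intro q hq
          have hqE : q ∈ (chunksOf l (lastP K (-1)) D).reverse := by rw [hEeq]; simp [hq]
          rw [List.mem_reverse] at hqE
          obtain ⟨b, hb, hqe⟩ := mem_chunksOf l D _ q hqE
          have hble : b ≤ l.length - 1 := mem_bdryList_le l (by rw [hKD]; exact List.mem_append.2 (Or.inr hb))
          rw [hqe]
          calc pmx (l.take (b+1)) ≤ pmx (l.take ((l.length - 1)+1)) := pmx_take_mono l hl hble
          _ = pmx l := by rw [show l.length - 1 + 1 = l.length from by omega, List.take_length]
        rw [foldl_max_const E' (pmx l) hrest]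
        rw [pmx_snoc l hl x, max_eq_left (le_of_lt hplx)]
  · -- count component
    show 1 + ((chunksOf l (lastP K (-1)) D).reverse.map (·.2)).sum = (l.length : Int) - lastP K (-1)
    rw [List.map_reverse, List.sum_reverse]
    rw [chunksOf_sum l D (lastP K (-1))]
    by_cases hDnil : D = []
    · rw [hDnil]
      have hKbs : K = bdryList l := by rw [hKD, hDnil, List.append_nil]
      have : lastP K (-1) = ((l.length - 1 : Nat) : Int) := by
        rw [hKbs]
        simp [lastP, hbsl]
      rw [show lastP ([] : List Nat) (lastP K (-1)) = lastP K (-1) from rfl, this]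
      omega
    · have hDlast : D.getLast? = some (l.length - 1) := by
        rw [hKD] at hbsl
        rwa [List.getLast?_append_of_ne_nil _ hDnil] at hbsl
      rw [show lastP D (lastP K (-1)) = ((l.length - 1 : Nat) : Int) from by simp [lastP, hDlast]]
      omega

-- the stack after the fold is the reversed chunk list
lemma stk_eq_bchunks : ∀ (a : List Int), a ≠ [] →
    a.foldl (fun st x => popB st x x 1) [] = (bchunks a).reverse := by
  intro a
  induction a using List.reverseRecOn with
  | nil => intro h; exact absurd rfl h
  | append_singleton l x ih =>
    intro _
    rw [List.foldl_append, List.foldl_cons, List.foldl_nil]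
    by_cases hl : l = []
    · subst hl
      show popB [] x x 1 = (bchunks [x]).reverse
      show [(x, 1)] = (bchunks [x]).reverse
      rw [show bchunks [x] = [(pmx ([x].take 1), 0 - (-1))] from rfl]
      norm_num [pmx]
    · rw [ih hl]
      exact step_main l hl x

lemma maxValue_alt_eq_renderC (a : List Int) (ha : a ≠ []) :
    maxValue_alt a = renderC (bchunks a) := by
  show (a.foldl (fun st x => popB st x x 1) []).reverse.foldl
      (fun out mc => out ++ List.replicate mc.2.toNat mc.1) [] = renderC (bchunks a)
  rw [stk_eq_bchunks a ha, List.reverse_reverse]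
  rw [PySem.List.foldl_append_eq_flatMap]
  rfl

-- ===== VERDICT (by name: the statement is the Claim_ definition above) =====
theorem maxValue_spec : Claim_equal_maxValue := by
  intro a _
  unfold Spec_maxValue
  match a with
  | [] => rfl
  | [x] =>
    show maxValue [x] = maxValue_alt [x]
    simp [maxValue, maxValue_alt, popB]
  | x :: y :: t =>
    rw [maxValue_eq_renderC _ (by simp only [List.length_cons]; omega),
        maxValue_alt_eq_renderC _ (List.cons_ne_nil x (y :: t))]
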